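-- pv_equiv track=rewrite | github.com/milodepilo/Winc | for/main.py | shortest_names
-- ===== SOURCE A (Python) =====
-- def shortest_names(list_of_countries):
--     min_len = 10
--     list_of_shortest_names = []
--     for country in list_of_countries:
--         if len(country) < min_len:
--             min_len = len(country)
--             list_of_shortest_names.append(country)
--         else:
--             continue
--     return list_of_shortest_names
-- ===== SOURCE B (Python) =====
-- def shortest_names(list_of_countries):
--     # Pass 1: prefix-minimum table; mins[i] = min of 10 and lengths of countries before index i.
--     mins = [10]
--     m = 10
--     for c in list_of_countries:
--         m = min(m, len(c))
--         mins.append(m)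
--     # Pass 2: keep each country strictly shorter than the prefix minimum before it.
--     return [c for c, m in zip(list_of_countries, mins) if len(c) < m]
-- ===== Notes on version B (the rewrite author's own statement) =====
-- stated objective: alternative
-- what changed: Replaces the single stateful compare-then-append scan by two passes: first build a prefix-minimum-length table, then filter the list against that table with zip.
import Mathlib
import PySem

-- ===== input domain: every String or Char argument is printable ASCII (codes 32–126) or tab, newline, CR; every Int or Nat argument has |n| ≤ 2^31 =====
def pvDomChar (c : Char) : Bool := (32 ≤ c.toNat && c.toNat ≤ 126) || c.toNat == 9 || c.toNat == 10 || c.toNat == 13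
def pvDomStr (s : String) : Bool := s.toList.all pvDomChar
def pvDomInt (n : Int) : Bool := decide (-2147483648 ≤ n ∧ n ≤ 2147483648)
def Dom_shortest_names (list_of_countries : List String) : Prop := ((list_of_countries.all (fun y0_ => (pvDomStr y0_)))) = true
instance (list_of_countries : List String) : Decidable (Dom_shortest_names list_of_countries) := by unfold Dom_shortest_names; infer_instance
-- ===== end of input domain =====

-- B replaces A's single stateful scan by a prefix-minimum table pass followed by a zip-filter pass (alternative decomposition, same cost).


-- ===== PORT A =====
-- A: one fold carrying (min_len, accumulated result), appending when strictly shorter.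
def shortest_names (list_of_countries : List String) : List String :=
  (list_of_countries.foldl
    (fun (st : Nat × List String) country =>
      if country.toList.length < st.1 then (country.toList.length, st.2 ++ [country])
      else st)
    (10, [])).2

-- ===== PORT B =====
-- B pass 1: build mins = [10] ++ running minima (foldl carrying the table and the last minimum).
def pvMinsTable (list_of_countries : List String) : List Nat :=
  (list_of_countries.foldl
    (fun (st : List Nat × Nat) c =>
      let m := min st.2 c.toList.length
      (st.1 ++ [m], m))
    ([10], 10)).1

-- B pass 2: zip with the table and filter.
def shortest_names_alt (list_of_countries : List String) : List String :=
  ((list_of_countries.zip (pvMinsTable list_of_countries)).filter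
    (fun p => p.1.toList.length < p.2)).map (fun p => p.1)

-- ===== PRECONDITION & SPEC =====
def Spec_shortest_names (list_of_countries : List String) (out : List String) : Prop := out = shortest_names_alt list_of_countries
instance (list_of_countries : List String) (out : List String) : Decidable (Spec_shortest_names list_of_countries out) := by unfold Spec_shortest_names; infer_instance

-- ===== CLAIM (what is proved, stated in full; the proofs are below) =====
def Claim_equal_shortest_names : Prop := ∀ (list_of_countries : List String), Dom_shortest_names list_of_countries → Spec_shortest_names list_of_countries (shortest_names list_of_countries)

-- ===== LEMMAS AND PROOFS =====

-- Common recursive specification both ports are reduced to.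
def pvSpecRec (m : Nat) : List String → List String
  | [] => []
  | c :: rest =>
    if c.toList.length < m then c :: pvSpecRec c.toList.length rest
    else pvSpecRec m rest

-- A's fold accumulates acc ++ pvSpecRec m xs.
theorem pvFoldA (xs : List String) (m : Nat) (acc : List String) :
    (xs.foldl
      (fun (st : Nat × List String) country =>
        if country.toList.length < st.1 then (country.toList.length, st.2 ++ [country])
        else st)
      (m, acc)).2 = acc ++ pvSpecRec m xs := by
  induction xs generalizing m acc with
  | nil => simp [pvSpecRec]
  | cons c rest ih =>
    simp only [List.foldl, pvSpecRec]
    by_cases h : c.toList.length < m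
    · rw [if_pos h, if_pos h, ih]; simp
    · rw [if_neg h, if_neg h, ih]

-- The recursive shape of B's table.
def pvTblRec (m : Nat) : List String → List Nat
  | [] => []
  | c :: rest => min m c.toList.length :: pvTblRec (min m c.toList.length) rest

theorem pvFoldTbl (xs : List String) (m : Nat) (acc : List Nat) :
    (xs.foldl
      (fun (st : List Nat × Nat) c =>
        let m := min st.2 c.toList.length
        (st.1 ++ [m], m))
      (acc, m)).1 = acc ++ pvTblRec m xs := by
  induction xs generalizing m acc with
  | nil => simp [pvTblRec]
  | cons c rest ih =>
    simp only [List.foldl, pvTblRec]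
    rw [ih]; simp

theorem pvZipFilter (xs : List String) (m : Nat) :
    ((xs.zip (m :: pvTblRec m xs)).filter
      (fun p => p.1.toList.length < p.2)).map (fun p => p.1) = pvSpecRec m xs := by
  induction xs generalizing m with
  | nil => simp [pvSpecRec]
  | cons c rest ih =>
    simp only [pvTblRec, List.zip_cons_cons, List.filter, pvSpecRec]
    by_cases h : c.toList.length < m
    · have hm : min m c.toList.length = c.toList.length := by omega
      rw [if_pos h]
      simp only [decide_eq_true h]
      rw [hm, List.map_cons, ih]
    · have hm : min m c.toList.length = m := by omega
      rw [if_neg h]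
      simp only [decide_eq_false h]
      rw [hm, ih]

-- ===== VERDICT (by name: the statement is the Claim_ definition above) =====
theorem shortest_names_spec : Claim_equal_shortest_names := by
  intro xs _
  unfold Spec_shortest_names shortest_names shortest_names_alt pvMinsTable
  rw [pvFoldA, pvFoldTbl]
  simp only [List.nil_append, List.singleton_append]
  rw [pvZipFilter]
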